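-- pv_equiv track=rewrite | github.com/Batcoconut/ImageProjetMaster | ImageProcessing.py | compteurPoids
-- ===== SOURCE A (Python) =====
-- def compteurPoids(tab,indice):
--
--     val = 0;
--     for i in range(0,len(tab)):
--         if(tab[i] == indice):
--             if( i <= 5):
--                 val = val+4
--             elif (i > 5 and i< 20):
--                 val = val+2
--             else:
--                 val = val+1
--
--
--     return val
-- ===== SOURCE B (Python) =====
-- def compteurPoids(tab, indice):
--     # weights: indices 0..5 -> 4, 6..19 -> 2, 20.. -> 1
--     return (4 * tab[:6].count(indice)
--             + 2 * tab[6:20].count(indice)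
--             + tab[20:].count(indice))
-- ===== Notes on version B (the rewrite author's own statement) =====
-- stated objective: simpler
-- what changed: Replaced the explicit index loop with a branching accumulator by three slice counts (tab[:6], tab[6:20], tab[20:]) combined with their weights 4/2/1.
import Mathlib
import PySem

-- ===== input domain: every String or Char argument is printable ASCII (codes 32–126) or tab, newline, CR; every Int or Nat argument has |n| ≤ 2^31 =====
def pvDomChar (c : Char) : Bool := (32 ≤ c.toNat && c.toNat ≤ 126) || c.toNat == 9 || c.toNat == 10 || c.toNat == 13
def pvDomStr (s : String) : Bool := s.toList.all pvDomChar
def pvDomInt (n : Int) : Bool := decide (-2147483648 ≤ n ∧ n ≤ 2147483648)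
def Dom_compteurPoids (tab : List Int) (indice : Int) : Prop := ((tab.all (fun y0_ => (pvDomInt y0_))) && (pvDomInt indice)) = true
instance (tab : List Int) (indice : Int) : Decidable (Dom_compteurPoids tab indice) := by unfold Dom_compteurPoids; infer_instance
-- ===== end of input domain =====

-- B replaces A's index loop and branching accumulator by three weighted slice counts; objective: simpler.


-- ===== PORT A =====
def compteurPoids (tab : List Int) (indice : Int) : Int :=
  (PySem.List.pyRange 0 (PySem.List.len tab) 1).foldl (fun val i =>
    if PySem.List.pyGetD tab i 0 = indice then
      if i ≤ 5 then val + 4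
      else if 5 < i ∧ i < 20 then val + 2
      else val + 1
    else val) 0

-- ===== PORT B =====
def compteurPoids_alt (tab : List Int) (indice : Int) : Int :=
  4 * (PySem.List.count (PySem.List.slice tab none (some 6)) indice : Int)
  + 2 * (PySem.List.count (PySem.List.slice tab (some 6) (some 20)) indice : Int)
  + (PySem.List.count (PySem.List.slice tab (some 20) none) indice : Int)

-- ===== PRECONDITION & SPEC =====
def Spec_compteurPoids (tab : List Int) (indice : Int) (out : Int) : Prop := out = compteurPoids_alt tab indice
instance (tab : List Int) (indice : Int) (out : Int) : Decidable (Spec_compteurPoids tab indice out) := by unfold Spec_compteurPoids; infer_instance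

-- ===== CLAIM (what is proved, stated in full; the proofs are below) =====
def Claim_equal_compteurPoids : Prop := ∀ (tab : List Int) (indice : Int), Dom_compteurPoids tab indice → Spec_compteurPoids tab indice (compteurPoids tab indice)

-- ===== LEMMAS AND PROOFS =====

theorem A_snoc (tab : List Int) (x indice : Int) :
    compteurPoids (tab ++ [x]) indice =
      compteurPoids tab indice +
        (if x = indice then
           (if tab.length ≤ 5 then 4 else if tab.length < 20 then 2 else 1)
         else 0) := by
  unfold compteurPoids
  simp only [PySem.List.len_eq, List.length_append, List.length_singleton]
  rw [show ((tab.length + 1 : Nat) : Int) = (tab.length : Int) + 1 from by push_cast; ring,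
      PySem.List.pyRange_one_succ_right (Int.natCast_nonneg _),
      List.foldl_append]
  have hcongr :
      (PySem.List.pyRange 0 (tab.length : Int) 1).foldl (fun val i =>
        if PySem.List.pyGetD (tab ++ [x]) i 0 = indice then
          if i ≤ 5 then val + 4
          else if 5 < i ∧ i < 20 then val + 2
          else val + 1
        else val) (0 : Int)
      = (PySem.List.pyRange 0 (tab.length : Int) 1).foldl (fun val i =>
        if PySem.List.pyGetD tab i 0 = indice then
          if i ≤ 5 then val + 4
          else if 5 < i ∧ i < 20 then val + 2
          else val + 1
        else val) (0 : Int) := by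
    apply PySem.List.foldl_congr_mem
    intro acc i hi
    rw [PySem.List.mem_pyRange_one] at hi
    rw [PySem.List.pyGetD_eq_getElem _ _ hi.1 (by simp; omega),
        PySem.List.pyGetD_eq_getElem _ _ hi.1 (by exact_mod_cast hi.2),
        List.getElem_append_left (by omega)]
  rw [hcongr]
  simp only [List.foldl_cons, List.foldl_nil]
  rw [PySem.List.pyGetD_eq_getElem _ _ (Int.natCast_nonneg _) (by simp)]
  simp only [Int.toNat_natCast, List.getElem_concat_length]
  by_cases hx : x = indice <;> simp [hx] <;> split_ifs <;> omega

theorem B_snoc (tab : List Int) (x indice : Int) :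
    compteurPoids_alt (tab ++ [x]) indice =
      compteurPoids_alt tab indice +
        (if x = indice then
           (if tab.length ≤ 5 then 4 else if tab.length < 20 then 2 else 1)
         else 0) := by
  simp only [compteurPoids_alt, PySem.List.count_eq]
  rw [show ((6:Int)) = ((6:Nat):Int) by norm_num, show ((20:Int)) = ((20:Nat):Int) by norm_num,
      PySem.List.slice_to_natCast, PySem.List.slice_to_natCast,
      PySem.List.slice_from_natCast, PySem.List.slice_from_natCast,
      PySem.List.slice_natCast, PySem.List.slice_natCast]
  simp only [List.take_append, List.drop_append]
  rcases le_or_gt 6 tab.length with h6 | h6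
  · rcases le_or_gt 20 tab.length with h20 | h20
    · simp [List.count_append, show (6 - tab.length) = 0 from by omega,
            show (20 - tab.length) = 0 from by omega,
            show (14 - (tab.length - 6)) = 0 from by omega]
      split_ifs <;> simp_all <;> omega
    · simp only [List.length_drop]
      rw [show (6 - tab.length) = 0 from by omega,
          show (20 - 6 - (tab.length - 6)) = (13 - (tab.length - 6)) + 1 from by omega,
          show (20 - tab.length) = (19 - tab.length) + 1 from by omega]
      simp [List.count_append]
      split_ifs <;> simp_all <;> omega
  · simp only [List.length_drop]
    rw [show (6 - tab.length) = (5 - tab.length) + 1 from by omega,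
        show (20 - tab.length) = (19 - tab.length) + 1 from by omega]
    simp [List.count_append]
    split_ifs <;> simp_all <;> omega

-- ===== VERDICT (by name: the statement is the Claim_ definition above) =====
theorem AB_eq (tab : List Int) (indice : Int) :
    compteurPoids tab indice = compteurPoids_alt tab indice := by
  induction tab using List.reverseRecOn with
  | nil => rfl
  | append_singleton t x ih => rw [A_snoc, B_snoc, ih]

theorem compteurPoids_spec : Claim_equal_compteurPoids := by
  intro tab indice _
  exact AB_eq tab indice
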